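-- pv_equiv track=rewrite | github.com/Lupus1988/wg-server-panel | panel/app.py | next_channel_name
-- ===== SOURCE A (Python) =====
-- def next_channel_name(existing_channels):
--     used = set()
--     for item in existing_channels:
--         try:
--             used.add(int(item))
--         except Exception:
--             continue
--     for i in range(1, 256):
--         if i not in used:
--             return str(i)
--     raise RuntimeError("kein freier Server-Slot mehr verfügbar")
-- ===== SOURCE B (Python) =====
-- def next_channel_name(existing_channels):
--     # collect parsed channel numbers, sort them, then scan with a counter:
--     # 'expected' is the smallest candidate not yet proven used.
--     nums = []
--     for item in existing_channels:
--         try: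
--             nums.append(int(item))
--         except Exception:
--             continue
--     expected = 1
--     for v in sorted(nums):
--         if v > expected:
--             break
--         if v == expected:
--             expected += 1
--     if expected <= 255:
--         return str(expected)
--     raise RuntimeError("kein freier Server-Slot mehr verfügbar")
-- ===== Notes on version B (the rewrite author's own statement) =====
-- stated objective: alternative
-- what changed: Instead of building a used-set and scanning 1..255 for the first absent number, B collects the parsed numbers into a list, sorts it, and sweeps it once with an 'expected' counter that advances past each matched value (break on a gap), yielding the smallest unused positive number.
import Mathlib
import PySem

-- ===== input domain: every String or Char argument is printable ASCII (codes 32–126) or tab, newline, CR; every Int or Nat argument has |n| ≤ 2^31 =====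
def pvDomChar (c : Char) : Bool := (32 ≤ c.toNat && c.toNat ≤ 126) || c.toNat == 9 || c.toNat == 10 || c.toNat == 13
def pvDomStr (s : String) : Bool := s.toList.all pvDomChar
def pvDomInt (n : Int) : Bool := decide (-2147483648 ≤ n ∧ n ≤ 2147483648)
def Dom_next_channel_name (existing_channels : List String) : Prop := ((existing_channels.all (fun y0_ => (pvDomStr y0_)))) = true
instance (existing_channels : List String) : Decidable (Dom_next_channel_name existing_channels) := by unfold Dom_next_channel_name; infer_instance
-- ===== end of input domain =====

-- B replaces A's used-set plus first-missing scan over 1..255 by sort-then-sweep: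
-- it sorts the parsed numbers and walks them once with an 'expected' counter; same result, different algorithm.

-- ===== PORT A =====
-- loop body of A: try used.add(int(item)) except Exception: continue
def pvStepA (u : PySem.Set Int) (item : String) : PySem.Set Int :=
  match PySem.Int.ofStr? item with
  | some n => PySem.Set.add u n
  | none => u

def next_channel_name (existing_channels : List String) : String :=
  -- used = set(); for item: try used.add(int(item)) except: continue
  let used : PySem.Set Int := existing_channels.foldl pvStepA PySem.Set.empty
  -- for i in range(1, 256): if i not in used: return str(i)
  match (PySem.List.pyRange 1 256 1).find? (fun i => !(PySem.Set.contains used i)) with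
  | some i => PySem.Int.toStr i
  | none => ""  -- raise RuntimeError in Python; excluded by Pre_

-- ===== PORT B =====
-- loop body of B: try nums.append(int(item)) except Exception: continue
def pvStepB (acc : List Int) (item : String) : List Int :=
  match PySem.Int.ofStr? item with
  | some n => acc ++ [n]
  | none => acc

-- for v in sorted(nums): if v > expected: break; if v == expected: expected += 1
def pvScan : Int → List Int → Int
  | e, [] => e
  | e, v :: t => if e < v then e else if v = e then pvScan (e + 1) t else pvScan e t

def next_channel_name_alt (existing_channels : List String) : String :=
  let nums : List Int := existing_channels.foldl pvStepB []
  let expected : Int := pvScan 1 (PySem.List.sorted nums (fun x => x) false)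
  if expected ≤ 255 then PySem.Int.toStr expected
  else ""  -- raise RuntimeError in Python; excluded by Pre_

-- ===== PRECONDITION & SPEC =====
-- Pre_ excludes exactly the inputs on which the Python A (and B) raises RuntimeError:
-- those where every channel number 1..255 occurs as an int value of some input string.
def Pre_next_channel_name (existing_channels : List String) : Prop :=
  ∃ i ∈ PySem.List.pyRange 1 256 1, ∀ s ∈ existing_channels, PySem.Int.ofStr? s ≠ some i
instance (existing_channels : List String) : Decidable (Pre_next_channel_name existing_channels) := by
  unfold Pre_next_channel_name; infer_instance
def pvWitness_next_channel_name : List String := ["1", "7", "x"]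
def Spec_next_channel_name (existing_channels : List String) (out : String) : Prop := out = next_channel_name_alt existing_channels
instance (existing_channels : List String) (out : String) : Decidable (Spec_next_channel_name existing_channels out) := by unfold Spec_next_channel_name; infer_instance

-- ===== CLAIM (what is proved, stated in full; the proofs are below) =====
def Claim_equal_next_channel_name : Prop := ∀ (existing_channels : List String), Dom_next_channel_name existing_channels → Pre_next_channel_name existing_channels → Spec_next_channel_name existing_channels (next_channel_name existing_channels)

-- ===== LEMMAS AND PROOFS =====

-- A's add-if-parses loop is a fold of Set.add over the parsed values
theorem pv_foldl_stepA : ∀ (xs : List String) (init : PySem.Set Int),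
    xs.foldl pvStepA init = (xs.filterMap PySem.Int.ofStr?).foldl PySem.Set.add init := by
  intro xs
  induction xs with
  | nil => intro init; rfl
  | cons x t ih =>
      intro init
      simp only [List.foldl_cons, List.filterMap_cons, pvStepA]
      cases PySem.Int.ofStr? x <;> simp [ih]

-- B's append-if-parses loop collects exactly the parsed values, in order
theorem pv_foldl_stepB : ∀ (xs : List String) (init : List Int),
    xs.foldl pvStepB init = init ++ xs.filterMap PySem.Int.ofStr? := by
  intro xs
  induction xs with
  | nil => intro init; simp
  | cons x t ih =>
      intro init
      simp only [List.foldl_cons, List.filterMap_cons, pvStepB]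
      cases PySem.Int.ofStr? x <;> simp [ih]

-- the sweep over a ≤-sorted list computes the least k ≥ e that is not in the list
theorem pv_scan_spec : ∀ (l : List Int) (e : Int), l.Pairwise (· ≤ ·) →
    e ≤ pvScan e l ∧ pvScan e l ∉ l ∧ (∀ k, e ≤ k → k < pvScan e l → k ∈ l) := by
  intro l
  induction l with
  | nil => intro e _; exact ⟨le_refl _, by simp [pvScan], fun k hk hk' => absurd hk' (by simp [pvScan] at *; omega)⟩
  | cons v t ih =>
      intro e hp
      have hvt : ∀ y ∈ t, v ≤ y := (List.pairwise_cons.mp hp).1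
      have hpt : t.Pairwise (· ≤ ·) := (List.pairwise_cons.mp hp).2
      by_cases h1 : e < v
      · -- break: result is e, and e is below every element
        simp only [pvScan, if_pos h1]
        refine ⟨le_refl _, ?_, fun k hk hk' => absurd hk' (by omega)⟩
        intro hmem
        rcases List.mem_cons.mp hmem with h | h
        · omega
        · exact absurd (hvt e h) (by omega)
      · by_cases h2 : v = e
        · -- matched: advance expected
          simp only [pvScan, if_neg h1, if_pos h2]
          obtain ⟨ha, hb, hc⟩ := ih (e + 1) hpt
          refine ⟨by omega, ?_, ?_⟩
          · intro hmem
            rcases List.mem_cons.mp hmem with h | h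
            · omega
            · exact hb h
          · intro k hk hk'
            by_cases hke : k = e
            · exact List.mem_cons.mpr (Or.inl (by omega))
            · exact List.mem_cons.mpr (Or.inr (hc k (by omega) hk'))
        · -- v < e: skip
          simp only [pvScan, if_neg h1, if_neg h2]
          obtain ⟨ha, hb, hc⟩ := ih e hpt
          refine ⟨ha, ?_, fun k hk hk' => List.mem_cons.mpr (Or.inr (hc k hk hk'))⟩
          intro hmem
          rcases List.mem_cons.mp hmem with h | h
          · omega
          · exact hb h
      
-- find? on an increasing integer range returns the stated first witness
theorem pv_find_range (p : Int → Bool) (b : Int) : ∀ (n : Nat) (a m : Int), b - a ≤ (n : Int) →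
    a ≤ m → m < b → p m = true → (∀ k, a ≤ k → k < m → p k = false) →
    (PySem.List.pyRange a b 1).find? p = some m := by
  intro n
  induction n with
  | zero => intro a m h1 h2 h3 _ _; omega
  | succ n ih =>
      intro a m h1 h2 h3 hp hlow
      have hab : a < b := by omega
      rw [PySem.List.pyRange_one_cons hab, List.find?_cons]
      by_cases hpa : p a = true
      · have ham : a = m := by
          by_contra hne
          exact absurd hpa (by simp [hlow a (le_refl _) (by omega)])
        subst ham; simp [hpa]
      · have : p a = false := by simpa using hpa
        rw [this]
        have ham : a < m := by
          rcases lt_or_eq_of_le h2 with h | h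
          · exact h
          · rw [h] at this; rw [this] at hp; exact absurd hp (by simp)
        exact ih (a + 1) m (by omega) (by omega) h3 hp (fun k hk hk' => hlow k (by omega) hk')

-- ===== VERDICT (by name: the statement is the Claim_ definition above) =====
theorem next_channel_name_spec : Claim_equal_next_channel_name := by
  intro xs _ hpre
  unfold Spec_next_channel_name next_channel_name next_channel_name_alt
  simp only []
  rw [pv_foldl_stepA, pv_foldl_stepB]
  set parsed := xs.filterMap PySem.Int.ofStr? with hpdef
  simp only [List.nil_append]
  have hused : parsed.foldl PySem.Set.add PySem.Set.empty = PySem.Set.ofList parsed := by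
    rw [PySem.Set.ofList_eq_foldl]; rfl
  rw [hused]
  -- characterise B's result
  set m := pvScan 1 (PySem.List.sorted parsed (fun x => x) false) with hmdef
  obtain ⟨hm1, hm2, hm3⟩ := pv_scan_spec _ 1 (PySem.List.sorted_pairwise parsed (fun x => x))
  rw [← hmdef] at hm1 hm2 hm3
  have hm2' : m ∉ parsed := fun h => hm2 ((PySem.List.mem_sorted _ _ _ _).mpr h)
  have hm3' : ∀ k, 1 ≤ k → k < m → k ∈ parsed :=
    fun k hk hk' => (PySem.List.mem_sorted _ _ _ _).mp (hm3 k hk hk')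
  -- Pre_ gives an unused slot in 1..255, so m ≤ 255
  obtain ⟨i, hiR, hi⟩ := hpre
  have hiP : i ∉ parsed := by
    intro h
    obtain ⟨s, hs, hs'⟩ := List.mem_filterMap.mp h
    exact hi s hs hs'
  have hir : 1 ≤ i ∧ i < 256 := by
    have := (PySem.List.mem_pyRange_one).mp hiR
    omega
  have hm255 : m ≤ 255 := by
    by_contra h
    exact hiP (hm3' i hir.1 (by omega))
  -- the predicate of A's find? is 'not in parsed'
  have hpred : ∀ k : Int, (!(PySem.Set.contains (PySem.Set.ofList parsed) k)) = decide (k ∉ parsed) := by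
    intro k
    by_cases h : k ∈ parsed <;> simp [PySem.Set.mem_ofList, h]
  have hf : (PySem.List.pyRange 1 256 1).find?
      (fun i => !(PySem.Set.contains (PySem.Set.ofList parsed) i)) = some m := by
    apply pv_find_range _ 256 255 1 m (by omega) hm1 (by omega)
    · rw [hpred]; simpa using hm2'
    · intro k hk hk'
      rw [hpred]
      simpa using hm3' k hk hk'
  rw [hf, if_pos hm255]
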